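-- pv_equiv track=rewrite | github.com/vllm-project/vllm-ascend | .agents/skills/dbo-overlap-template-writer/scripts/analyze_ascend_profiling.py | parse_rank_from_dirname
-- ===== SOURCE A (Python) =====
-- from typing import Any, Dict, List, Optional, Sequence, Set, Tuple
--
-- def parse_rank_from_dirname(dirname: str) -> Dict[str, Any]:
--     """Parse dp/pp/tp/ep/rank info from directory name like
--     dp0_pp0_tp0_dcp0_ep0_rank0_25596_20260402090434918_ascend_pt"""
--     info = {}
--     parts = dirname.split("_")
--     for part in parts:
--         for prefix in ("dp", "pp", "tp", "dcp", "ep", "rank"):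
--             if part.startswith(prefix) and part[len(prefix):].isdigit():
--                 info[prefix] = int(part[len(prefix):])
--     return info
-- ===== SOURCE B (Python) =====
-- def parse_rank_from_dirname(dirname: str):
--     """Parse dp/pp/tp/ep/rank info from directory name like
--     dp0_pp0_tp0_dcp0_ep0_rank0_25596_20260402090434918_ascend_pt
--
--     Single parse per token: split the token at its first digit into a
--     letter head and a digit tail, then one set lookup -- no inner loop
--     over the six known prefixes."""
--     keys = {"dp", "pp", "tp", "dcp", "ep", "rank"}
--     info = {}
--     for part in dirname.split("_"):
--         i = 0
--         while i < len(part) and not part[i].isdigit():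
--             i += 1
--         head, tail = part[:i], part[i:]
--         if head in keys and tail.isdigit():
--             info[head] = int(tail)
--     return info
-- ===== Notes on version B (the rewrite author's own statement) =====
-- stated objective: simpler
-- what changed: B replaces A's inner loop over the six known prefixes with a single parse per token (split the token at its first digit into letter head and digit tail) followed by one set-membership test.
import Mathlib
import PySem

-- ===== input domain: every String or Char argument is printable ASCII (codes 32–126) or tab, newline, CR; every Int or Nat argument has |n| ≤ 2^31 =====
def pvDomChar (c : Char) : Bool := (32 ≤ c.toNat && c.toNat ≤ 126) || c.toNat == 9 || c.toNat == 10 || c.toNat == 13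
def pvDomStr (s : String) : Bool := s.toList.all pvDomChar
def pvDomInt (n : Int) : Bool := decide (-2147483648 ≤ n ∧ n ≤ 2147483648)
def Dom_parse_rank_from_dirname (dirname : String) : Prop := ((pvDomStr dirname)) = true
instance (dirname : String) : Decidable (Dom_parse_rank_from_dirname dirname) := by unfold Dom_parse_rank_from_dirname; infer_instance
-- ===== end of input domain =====

-- B parses each token once (letter head / digit tail) instead of A's inner loop over six prefixes; same return value, objective: simpler.

-- ===== PORT A =====
-- literal transliteration of A: for each '_'-token, try each of the six prefixes;
-- int(...) is guarded by isdigit, so the .getD 0 default is never used on ASCII digit tails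
def parse_rank_from_dirname (dirname : String) : List (String × Int) :=
  (((PySem.Str.split? dirname "_").getD []).foldl (fun info part =>
      (["dp", "pp", "tp", "dcp", "ep", "rank"] : List String).foldl (fun info pre =>
        if PySem.Str.startswith part pre &&
           PySem.Str.strIsdigit (PySem.Str.slice part (some (PySem.Str.len pre)) none) then
          info.insert pre
            ((PySem.Int.ofStr? (PySem.Str.slice part (some (PySem.Str.len pre)) none)).getD 0)
        else info) info)
    (PySem.Dict.empty : PySem.Dict String Int)).items

-- ===== PORT B =====
-- the while loop 'i = 0; while i < len(part) and not part[i].isdigit(): i += 1'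
def pvFirstDigitIdx : List Char → Nat
  | [] => 0
  | c :: cs => if PySem.Chars.isdigit c then 0 else pvFirstDigitIdx cs + 1

-- transliteration of B: one parse per token (part[:i], part[i:] with 0 ≤ i ≤ len, i.e. take/drop), one set lookup
def parse_rank_from_dirname_alt (dirname : String) : List (String × Int) :=
  (((PySem.Str.split? dirname "_").getD []).foldl (fun info part =>
      let i := pvFirstDigitIdx part.toList
      let head := String.ofList (part.toList.take i)
      let tail := part.toList.drop i
      if (["dp", "pp", "tp", "dcp", "ep", "rank"] : List String).contains head &&
         PySem.Chars.strIsdigit tail then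
        info.insert head ((PySem.Int.ofChars? tail).getD 0)
      else info)
    (PySem.Dict.empty : PySem.Dict String Int)).items

-- ===== PRECONDITION & SPEC =====
def Spec_parse_rank_from_dirname (dirname : String) (out : List (String × Int)) : Prop := out = parse_rank_from_dirname_alt dirname
instance (dirname : String) (out : List (String × Int)) : Decidable (Spec_parse_rank_from_dirname dirname out) := by unfold Spec_parse_rank_from_dirname; infer_instance

-- ===== CLAIM (what is proved, stated in full; the proofs are below) =====
def Claim_equal_parse_rank_from_dirname : Prop := ∀ (dirname : String), Dom_parse_rank_from_dirname dirname → Spec_parse_rank_from_dirname dirname (parse_rank_from_dirname dirname)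

-- ===== LEMMAS AND PROOFS =====

theorem drop_min (cs : List Char) (k : Nat) : cs.drop (min k cs.length) = cs.drop k := by
  rcases le_total k cs.length with h | h
  · rw [min_eq_left h]
  · rw [min_eq_right h, List.drop_of_length_le h, List.drop_of_length_le (le_refl _)]

theorem sliceA (cs : List Char) (k : Int) (hk : 0 ≤ k) :
    PySem.List.slice cs (some k) none = cs.drop k.toNat := by
  rw [PySem.List.slice_some_none]
  have h : PySem.List.clampIdx cs.length k = min k.toNat cs.length := by
    simp [PySem.List.clampIdx, not_lt.mpr hk]
  rw [h, drop_min]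

theorem pvFirstDigitIdx_take (cs : List Char) :
    cs.take (pvFirstDigitIdx cs) = cs.takeWhile (fun c => !PySem.Chars.isdigit c) := by
  induction cs with
  | nil => rfl
  | cons c cs ih =>
    by_cases h : PySem.Chars.isdigit c <;>
      simp [pvFirstDigitIdx, List.takeWhile, h, ih]

theorem pvFirstDigitIdx_drop (cs : List Char) :
    cs.drop (pvFirstDigitIdx cs) = cs.dropWhile (fun c => !PySem.Chars.isdigit c) := by
  induction cs with
  | nil => rfl
  | cons c cs ih =>
    by_cases h : PySem.Chars.isdigit c <;>
      simp [pvFirstDigitIdx, List.dropWhile, h, ih]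

theorem drop_len_of_takeWhile (cs ps : List Char)
    (h : cs.takeWhile (fun c => !PySem.Chars.isdigit c) = ps) :
    cs.drop ps.length = cs.dropWhile (fun c => !PySem.Chars.isdigit c) := by
  have hsplit := List.takeWhile_append_dropWhile
    (p := fun c => !PySem.Chars.isdigit c) (l := cs)
  rw [h] at hsplit
  conv_lhs => rw [← hsplit]
  rw [List.drop_left]

theorem condA_eq (cs ps : List Char)
    (hnd : ps.all (fun c => !PySem.Chars.isdigit c) = true) :
    (PySem.Chars.startswith cs ps && PySem.Chars.strIsdigit (cs.drop ps.length))
    = (decide (cs.takeWhile (fun c => !PySem.Chars.isdigit c) = ps) &&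
       PySem.Chars.strIsdigit (cs.dropWhile (fun c => !PySem.Chars.isdigit c))) := by
  rw [Bool.eq_iff_iff]
  simp only [Bool.and_eq_true, decide_eq_true_eq]
  constructor
  · rintro ⟨hs, hd⟩
    rw [PySem.Chars.startswith_iff] at hs
    obtain ⟨r, rfl⟩ := hs
    rw [List.drop_left] at hd
    have hr : r.takeWhile (fun c => !PySem.Chars.isdigit c) = [] := by
      cases r with
      | nil => rfl
      | cons a r' =>
        simp [PySem.Chars.strIsdigit] at hd
        simp [List.takeWhile, hd.1]
    have htw : (ps ++ r).takeWhile (fun c => !PySem.Chars.isdigit c) = ps := by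
      rw [List.takeWhile_append]
      have : ps.takeWhile (fun c => !PySem.Chars.isdigit c) = ps := by
        apply List.takeWhile_eq_self_iff.mpr
        intro c hc
        exact (List.all_eq_true.mp hnd) c hc
      simp [this, hr]
    refine ⟨htw, ?_⟩
    rw [← drop_len_of_takeWhile _ _ htw, List.drop_left]
    exact hd
  · rintro ⟨htw, hd⟩
    rw [PySem.Chars.startswith_iff, drop_len_of_takeWhile _ _ htw]
    exact ⟨htw ▸ List.takeWhile_prefix _, hd⟩

theorem ofList_eq_iff (tw : List Char) (s : String) : String.ofList tw = s ↔ tw = s.toList :=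
  ⟨fun h => by rw [← h, String.toList_ofList], fun h => by rw [h, String.ofList_toList]⟩

theorem stepChars (info : PySem.Dict String Int) (cs : List Char) :
    ((["dp", "pp", "tp", "dcp", "ep", "rank"] : List String).foldl (fun info pre =>
        if PySem.Chars.startswith cs pre.toList &&
           PySem.Chars.strIsdigit (cs.drop pre.toList.length) then
          info.insert pre ((PySem.Int.ofChars? (cs.drop pre.toList.length)).getD 0)
        else info) info)
    = (let i := pvFirstDigitIdx cs
       let head := String.ofList (cs.take i)
       let tail := cs.drop i
       if (["dp", "pp", "tp", "dcp", "ep", "rank"] : List String).contains head &&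
          PySem.Chars.strIsdigit tail then
         info.insert head ((PySem.Int.ofChars? tail).getD 0)
       else info) := by
  simp only [pvFirstDigitIdx_take, pvFirstDigitIdx_drop,
    List.foldl_cons, List.foldl_nil,
    condA_eq cs ("dp" : String).toList (by decide),
    condA_eq cs ("pp" : String).toList (by decide),
    condA_eq cs ("tp" : String).toList (by decide),
    condA_eq cs ("dcp" : String).toList (by decide),
    condA_eq cs ("ep" : String).toList (by decide),
    condA_eq cs ("rank" : String).toList (by decide)]
  set tw := cs.takeWhile (fun c => !PySem.Chars.isdigit c) with htw
  set dw := cs.dropWhile (fun c => !PySem.Chars.isdigit c) with hdw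
  by_cases htd : PySem.Chars.strIsdigit dw = true
  · simp only [htd, Bool.and_true]
    by_cases h1 : tw = ['d','p']
    · have hv := drop_len_of_takeWhile cs ['d','p'] h1
      simp [← hdw] at hv
      simp [h1, hv, show String.ofList ['d','p'] = "dp" from by decide]
    by_cases h2 : tw = ['p','p']
    · have hv := drop_len_of_takeWhile cs ['p','p'] h2
      simp [← hdw] at hv
      simp [h2, hv, show String.ofList ['p','p'] = "pp" from by decide]
    by_cases h3 : tw = ['t','p']
    · have hv := drop_len_of_takeWhile cs ['t','p'] h3
      simp [← hdw] at hv
      simp [h3, hv, show String.ofList ['t','p'] = "tp" from by decide]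
    by_cases h4 : tw = ['d','c','p']
    · have hv := drop_len_of_takeWhile cs ['d','c','p'] h4
      simp [← hdw] at hv
      simp [h4, hv, show String.ofList ['d','c','p'] = "dcp" from by decide]
    by_cases h5 : tw = ['e','p']
    · have hv := drop_len_of_takeWhile cs ['e','p'] h5
      simp [← hdw] at hv
      simp [h5, hv, show String.ofList ['e','p'] = "ep" from by decide]
    by_cases h6 : tw = ['r','a','n','k']
    · have hv := drop_len_of_takeWhile cs ['r','a','n','k'] h6
      simp [← hdw] at hv
      simp [h6, hv, show String.ofList ['r','a','n','k'] = "rank" from by decide]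
    · simp [h1, h2, h3, h4, h5, h6, ofList_eq_iff]
  · simp [htd]

-- the two per-token step functions agree on every token
theorem step_eq (info : PySem.Dict String Int) (part : String) :
    ((["dp", "pp", "tp", "dcp", "ep", "rank"] : List String).foldl (fun info pre =>
        if PySem.Str.startswith part pre &&
           PySem.Str.strIsdigit (PySem.Str.slice part (some (PySem.Str.len pre)) none) then
          info.insert pre
            ((PySem.Int.ofStr? (PySem.Str.slice part (some (PySem.Str.len pre)) none)).getD 0)
        else info) info)
    = (let i := pvFirstDigitIdx part.toList
       let head := String.ofList (part.toList.take i)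
       let tail := part.toList.drop i
       if (["dp", "pp", "tp", "dcp", "ep", "rank"] : List String).contains head &&
          PySem.Chars.strIsdigit tail then
         info.insert head ((PySem.Int.ofChars? tail).getD 0)
       else info) := by
  simp only [PySem.Str.startswith_eq, PySem.Str.strIsdigit_eq, PySem.Str.toList_slice,
    PySem.Int.ofStr?, PySem.Chars.slice_eq_listSlice, PySem.Str.len_eq,
    sliceA _ _ (Int.natCast_nonneg _), Int.toNat_natCast]
  exact stepChars info part.toList

-- ===== VERDICT (by name: the statement is the Claim_ definition above) =====
theorem parse_rank_from_dirname_spec : Claim_equal_parse_rank_from_dirname := by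
  intro dirname _
  unfold Spec_parse_rank_from_dirname parse_rank_from_dirname parse_rank_from_dirname_alt
  congr 1
  apply PySem.List.foldl_congr_mem
  intro info part _
  exact step_eq info part
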